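-- pv_equiv track=rewrite | github.com/sevo/FLP-2020 | 7/cvicenie/exercises_answers.py | sample_no_rep
-- ===== SOURCE A (Python) =====
-- def pseudorandom(modulus, multiplier, increment, seed):
--     previous_value = seed
--     while True:
--         previous_value = (multiplier * previous_value + increment) % modulus
--         yield previous_value
--
-- def sample_no_rep(items):
--     random_generator = pseudorandom(2**31, 1103515245, 12345, 1)
--     length = len(items)
--     while length > 0:
--         index = next(random_generator) % length
--         yield items[index]
--         items = items[:index] + items[index+1:]
--         length -= 1
-- ===== SOURCE B (Python) =====
-- def _build(items, lo, hi):
--     # count-augmented segment tree over items[lo:hi]; leaf = [value, alive]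
--     if hi - lo == 1:
--         return [items[lo], True]
--     mid = (lo + hi) // 2
--     return [hi - lo, _build(items, lo, mid), _build(items, mid, hi)]
--
-- def _count(t):
--     if len(t) == 2:
--         return 1 if t[1] else 0
--     return t[0]
--
-- def _pop(t, k):
--     # remove and return the k-th (0-based) still-alive value, guided by counts
--     while len(t) == 3:
--         t[0] -= 1
--         lc = _count(t[1])
--         if k < lc:
--             t = t[1]
--         else:
--             k -= lc
--             t = t[2]
--     t[1] = False
--     return t[0]
--
-- def sample_no_rep(items):
--     prev = 1
--     n = len(items)
--     if n == 0:
--         return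
--     tree = _build(items, 0, n)
--     for remaining in range(n, 0, -1):
--         prev = (1103515245 * prev + 12345) % (2 ** 31)
--         yield _pop(tree, prev % remaining)
-- ===== Notes on version B (the rewrite author's own statement) =====
-- stated objective: faster
-- what changed: A rebuilds the remaining list every step by slicing (items[:i]+items[i+1:]); B builds a count-augmented binary tree over the items once and pops the k-th remaining element by descending node counts, so each draw costs O(log n) instead of O(n) list copying.
import Mathlib
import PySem

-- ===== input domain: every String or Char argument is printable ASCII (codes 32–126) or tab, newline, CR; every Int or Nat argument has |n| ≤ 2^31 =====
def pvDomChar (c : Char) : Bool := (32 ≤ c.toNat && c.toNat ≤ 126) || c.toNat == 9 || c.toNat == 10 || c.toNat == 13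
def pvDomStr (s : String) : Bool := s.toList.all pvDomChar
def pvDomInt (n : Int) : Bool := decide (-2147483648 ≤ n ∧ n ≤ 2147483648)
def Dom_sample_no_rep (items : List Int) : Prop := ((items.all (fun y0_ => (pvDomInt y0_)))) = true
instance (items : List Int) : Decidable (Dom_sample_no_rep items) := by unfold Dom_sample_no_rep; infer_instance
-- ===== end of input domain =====

-- B replaces A's per-step list rebuilding (items[:i]+items[i+1:]) by a count-augmented
-- tree built once, popping the k-th remaining element along a root-to-leaf path
-- (objective: faster — O(n log n) selection instead of O(n^2) slicing).

-- ===== PORT A =====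
-- the linear-congruential step of `pseudorandom(2**31, 1103515245, 12345, seed)`
def pvPrng (prev : Int) : Int := PySem.Int.mod (1103515245 * prev + 12345) (2 ^ 31)

-- A's while-loop: `length` is the fuel (A keeps it equal to len(items))
def pvALoop : Nat → Int → List Int → List Int
  | 0, _, _ => []
  | n + 1, prev, items =>
    let r := pvPrng prev
    let idx := PySem.Int.mod r ((n : Int) + 1)
    (PySem.List.pyGet? items idx).getD 0 ::
      pvALoop n r (PySem.List.slice items (some 0) (some idx) ++
                   PySem.List.slice items (some (idx + 1)) none)

def sample_no_rep (items : List Int) : List Int := pvALoop items.length 1 items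

-- ===== PORT B =====
-- Source B's tree: `[value, alive]` leaves and `[count, left, right]` nodes
inductive PvTree where
  | leaf : Int → Bool → PvTree
  | node : Nat → PvTree → PvTree → PvTree
deriving DecidableEq, Repr

-- Source B's `_count`
def pvCount : PvTree → Nat
  | .leaf _ a => if a then 1 else 0
  | .node c _ _ => c

-- Source B's `_build` over items[lo:hi]; Source B only ever calls it with lo < hi, so the
-- `hi - lo == 1` leaf test is written `≤ 1` to make the unreachable hi = lo case total;
-- Python's `(lo + hi) // 2` on these nonnegative ints is Nat division (PySem.Int.floordiv_natCast)
def pvBuild (items : List Int) (lo hi : Nat) : PvTree :=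
  if hi - lo ≤ 1 then
    .leaf ((PySem.List.pyGet? items (lo : Int)).getD 0) true
  else
    .node (hi - lo) (pvBuild items lo ((lo + hi) / 2)) (pvBuild items ((lo + hi) / 2) hi)
termination_by hi - lo
decreasing_by all_goals omega

-- Source B's `_pop`: in-place mutation along the path becomes path rebuilding
def pvPop : PvTree → Nat → Int × PvTree
  | .leaf v _, _ => (v, .leaf v false)
  | .node c l r, k =>
    let lc := pvCount l
    if k < lc then
      let p := pvPop l k
      (p.1, .node (c - 1) p.2 r)
    else
      let p := pvPop r (k - lc)
      (p.1, .node (c - 1) l p.2)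

-- Source B's for-loop over `remaining = n, n-1, …, 1`
def pvBLoop : Nat → Int → PvTree → List Int
  | 0, _, _ => []
  | rem + 1, prev, t =>
    let r := pvPrng prev
    let k := PySem.Int.mod r ((rem : Int) + 1)
    let p := pvPop t k.toNat
    p.1 :: pvBLoop rem r p.2

def sample_no_rep_alt (items : List Int) : List Int :=
  if items.length = 0 then []
  else pvBLoop items.length 1 (pvBuild items 0 items.length)

-- ===== PRECONDITION & SPEC =====
def Spec_sample_no_rep (items : List Int) (out : List Int) : Prop := out = sample_no_rep_alt items
instance (items : List Int) (out : List Int) : Decidable (Spec_sample_no_rep items out) := by unfold Spec_sample_no_rep; infer_instance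

-- ===== CLAIM (what is proved, stated in full; the proofs are below) =====
def Claim_equal_sample_no_rep : Prop := ∀ (items : List Int), Dom_sample_no_rep items → Spec_sample_no_rep items (sample_no_rep items)

-- ===== LEMMAS AND PROOFS =====

-- the still-alive values of a tree, in order
def pvFlat : PvTree → List Int
  | .leaf v a => if a then [v] else []
  | .node _ l r => pvFlat l ++ pvFlat r

-- node counts agree with the number of alive leaves below
def pvWF : PvTree → Prop
  | .leaf _ _ => True
  | .node c l r => c = (pvFlat l).length + (pvFlat r).length ∧ pvWF l ∧ pvWF r

lemma pvCount_eq (t : PvTree) (h : pvWF t) : pvCount t = (pvFlat t).length := by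
  cases t with
  | leaf v a => cases a <;> simp [pvCount, pvFlat]
  | node c l r => simp [pvCount, pvFlat, h.1]

lemma pvPop_spec : ∀ (t : PvTree) (k : Nat), pvWF t → k < (pvFlat t).length →
    (pvFlat t)[k]? = some (pvPop t k).1 ∧
    pvFlat (pvPop t k).2 = (pvFlat t).eraseIdx k ∧
    pvWF (pvPop t k).2 := by
  intro t
  induction t with
  | leaf v a =>
    intro k _ hk
    cases a with
    | false => simp [pvFlat] at hk
    | true =>
      have hk0 : k = 0 := by simpa [pvFlat] using hk
      subst hk0
      simp [pvFlat, pvPop, pvWF]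
  | node c l r ihl ihr =>
    intro k hwf hk
    obtain ⟨hc, hl, hr⟩ := hwf
    have hlc : pvCount l = (pvFlat l).length := pvCount_eq l hl
    simp only [pvFlat, List.length_append] at hk
    by_cases hcase : k < pvCount l
    · obtain ⟨i1, i2, i3⟩ := ihl k hl (by omega)
      refine ⟨?_, ?_, ?_⟩
      · simp only [pvFlat, pvPop, if_pos hcase]
        rw [List.getElem?_append_left (by omega)]
        exact i1
      · simp only [pvFlat, pvPop, if_pos hcase]
        rw [i2, List.eraseIdx_append_of_lt_length (by omega)]
      · simp only [pvPop, if_pos hcase, pvWF]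
        refine ⟨?_, i3, hr⟩
        rw [i2, List.length_eraseIdx_of_lt (by omega)]
        omega
    · have hkr : k - pvCount l < (pvFlat r).length := by omega
      obtain ⟨i1, i2, i3⟩ := ihr (k - pvCount l) hr hkr
      refine ⟨?_, ?_, ?_⟩
      · simp only [pvFlat, pvPop, if_neg hcase]
        rw [List.getElem?_append_right (by omega), ← hlc]
        exact i1
      · simp only [pvFlat, pvPop, if_neg hcase]
        have : k = (pvFlat l).length + (k - pvCount l) := by omega
        rw [i2, this, List.eraseIdx_append_of_length_le (by omega)]
        congr 2
        omega
      · simp only [pvPop, if_neg hcase, pvWF]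
        refine ⟨?_, hl, i3⟩
        rw [i2, List.length_eraseIdx_of_lt hkr]
        omega

lemma pvLoop_eq : ∀ (rem : Nat) (prev : Int) (t : PvTree),
    pvWF t → (pvFlat t).length = rem →
    pvALoop rem prev (pvFlat t) = pvBLoop rem prev t := by
  intro rem
  induction rem with
  | zero => intro prev t _ _; simp [pvALoop, pvBLoop]
  | succ m ih =>
    intro prev t hwf hlen
    have hpos : (0 : Int) < (m : Int) + 1 := by positivity
    set r := pvPrng prev with hr
    set k := PySem.Int.mod r ((m : Int) + 1) with hk
    have hk0 : 0 ≤ k := PySem.Int.mod_nonneg r hpos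
    have hklt : k < (m : Int) + 1 := PySem.Int.mod_lt r hpos
    have hkn : k.toNat < (pvFlat t).length := by omega
    obtain ⟨h1, h2, h3⟩ := pvPop_spec t k.toNat hwf hkn
    have hslice : PySem.List.slice (pvFlat t) (some 0) (some k) ++
        PySem.List.slice (pvFlat t) (some (k + 1)) none =
        (pvFlat t).eraseIdx k.toNat := by
      have hsucc : (k + 1).toNat = k.toNat + 1 := by omega
      rw [PySem.List.slice_zero_start, PySem.List.slice_to _ hk0,
          PySem.List.slice_from _ (by omega), hsucc, List.eraseIdx_eq_take_drop_succ]
    show (PySem.List.pyGet? (pvFlat t) k).getD 0 ::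
        pvALoop m r (PySem.List.slice (pvFlat t) (some 0) (some k) ++
          PySem.List.slice (pvFlat t) (some (k + 1)) none) =
      (pvPop t k.toNat).1 :: pvBLoop m r (pvPop t k.toNat).2
    rw [hslice, PySem.List.pyGet?_of_nonneg _ hk0, h1, ← h2]
    rw [ih r (pvPop t k.toNat).2 h3 (by rw [h2, List.length_eraseIdx_of_lt hkn]; omega)]
    rfl

lemma pvBuild_spec (items : List Int) : ∀ (d lo hi : Nat), hi - lo = d →
    lo < hi → hi ≤ items.length →
    pvFlat (pvBuild items lo hi) = (items.drop lo).take (hi - lo) ∧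
    pvWF (pvBuild items lo hi) := by
  intro d
  induction d using Nat.strong_induction_on with
  | _ d ih =>
    intro lo hi hd hlohi hhi
    rw [pvBuild]
    by_cases hbase : hi - lo ≤ 1
    · have hhi1 : hi = lo + 1 := by omega
      have hlolen : lo < items.length := by omega
      rw [if_pos hbase]
      constructor
      · have hdrop : List.drop lo items = items[lo] :: List.drop (lo + 1) items :=
          List.drop_eq_getElem_cons hlolen
        have h1 : hi - lo = 1 := by omega
        rw [h1, hdrop]
        simp only [pvFlat, List.take_succ_cons, List.take_zero, PySem.List.pyGet?_natCast,
          List.getElem?_eq_getElem hlolen, Option.getD_some, if_true]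
      · trivial
    · rw [if_neg hbase]
      have hmid1 : lo < (lo + hi) / 2 := by omega
      have hmid2 : (lo + hi) / 2 < hi := by omega
      obtain ⟨f1, w1⟩ := ih ((lo + hi) / 2 - lo) (by omega) lo ((lo + hi) / 2) rfl hmid1 (by omega)
      obtain ⟨f2, w2⟩ := ih (hi - (lo + hi) / 2) (by omega) ((lo + hi) / 2) hi rfl hmid2 hhi
      have hflat : pvFlat (PvTree.node (hi - lo) (pvBuild items lo ((lo + hi) / 2))
          (pvBuild items ((lo + hi) / 2) hi)) = (items.drop lo).take (hi - lo) := by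
        simp only [pvFlat, f1, f2]
        have hsplit : hi - lo = ((lo + hi) / 2 - lo) + (hi - (lo + hi) / 2) := by omega
        rw [hsplit, List.take_add, List.drop_drop]
        congr 3
        omega
      refine ⟨hflat, ?_, w1, w2⟩
      have e1 : ((items.drop lo).take ((lo + hi) / 2 - lo)).length = (lo + hi) / 2 - lo := by
        rw [List.length_take, List.length_drop]
        omega
      have e2 : ((items.drop ((lo + hi) / 2)).take (hi - (lo + hi) / 2)).length =
          hi - (lo + hi) / 2 := by
        rw [List.length_take, List.length_drop]
        omega
      rw [f1, f2, e1, e2]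
      omega

-- ===== VERDICT (by name: the statement is the Claim_ definition above) =====
theorem sample_no_rep_spec : Claim_equal_sample_no_rep := by
  intro items _
  show sample_no_rep items = sample_no_rep_alt items
  unfold sample_no_rep sample_no_rep_alt
  by_cases hnil : items.length = 0
  · rw [if_pos hnil, hnil]
    rfl
  · rw [if_neg hnil]
    obtain ⟨hf, hw⟩ := pvBuild_spec items items.length 0 items.length rfl (by omega) le_rfl
    simp only [List.drop_zero, Nat.sub_zero, List.take_length] at hf
    rw [← pvLoop_eq items.length 1 (pvBuild items 0 items.length) hw (by rw [hf]), hf]
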